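-- pv_equiv track=rewrite | github.com/sarry2905/ESKAPEE-Pathogen-Prediction | Scripts/feature_generation.py | count_kmers
-- ===== SOURCE A (Python) =====
-- def count_kmers(Sequence, kmer, kmin, kmax):
--     n = len(Sequence)
--     km = range(kmin, kmax + 1)
--     counter = dict()
--     for k in km:
--         for i in range(0, n - k + 1, 1):
--             mer = Sequence[i: i + k]
--             counter[mer] = counter.get(mer, 0) + 1
--     return [counter.get(key, 0) for key in kmer]
-- ===== SOURCE B (Python) =====
-- def count_kmers(Sequence, kmer, kmin, kmax):
--     n = len(Sequence)
--     out = []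
--     for key in kmer:
--         L = len(key)
--         if kmin <= L <= kmax:
--             out.append(sum(1 for i in range(n - L + 1) if Sequence[i:i + L] == key))
--         else:
--             out.append(0)
--     return out
-- ===== Notes on version B (the rewrite author's own statement) =====
-- stated objective: simpler
-- what changed: Instead of building a dict of counts of every k-mer for every k in [kmin,kmax] and then looking the requested keys up, B scans the sequence once per requested key, counting its overlapping occurrences directly (guarded by kmin <= len(key) <= kmax).
-- outside the precondition, e.g. on count_kmers('ab', ['ab', 'a'], -1, 2): A returns [1, 2], B returns [1, 1]
import Mathlib
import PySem

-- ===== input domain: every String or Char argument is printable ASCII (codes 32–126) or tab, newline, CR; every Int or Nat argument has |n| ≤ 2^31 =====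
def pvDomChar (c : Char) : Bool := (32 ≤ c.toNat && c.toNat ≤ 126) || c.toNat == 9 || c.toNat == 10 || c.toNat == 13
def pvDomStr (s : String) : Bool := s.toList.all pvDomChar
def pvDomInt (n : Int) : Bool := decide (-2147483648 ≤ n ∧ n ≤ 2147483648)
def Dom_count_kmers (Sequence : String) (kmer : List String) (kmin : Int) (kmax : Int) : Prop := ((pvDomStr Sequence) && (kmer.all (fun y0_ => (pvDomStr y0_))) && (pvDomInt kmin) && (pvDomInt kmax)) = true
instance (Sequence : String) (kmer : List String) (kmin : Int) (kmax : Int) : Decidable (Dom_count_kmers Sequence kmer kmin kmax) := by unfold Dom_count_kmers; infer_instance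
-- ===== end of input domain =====

-- B replaces A's build-a-table-of-all-k-mers-then-look-up strategy by a direct per-requested-key
-- count of overlapping occurrences (objective: simpler). Return values agree on all of Pre_.

-- ===== PORT A =====
def count_kmers (Sequence : String) (kmer : List String) (kmin : Int) (kmax : Int) : List Int :=
  let n : Int := PySem.Str.len Sequence
  let km := PySem.List.pyRange kmin (kmax + 1) 1
  let counter : PySem.Dict String Int :=
    km.foldl (fun counter k =>
      (PySem.List.pyRange 0 (n - k + 1) 1).foldl (fun counter i =>
        let mer := PySem.Str.slice Sequence (some i) (some (i + k))
        counter.modify mer 0 (· + 1)) counter) PySem.Dict.empty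
  kmer.map (fun key => counter.getD key 0)

-- ===== PORT B =====
def count_kmers_alt (Sequence : String) (kmer : List String) (kmin : Int) (kmax : Int) : List Int :=
  let n : Int := PySem.Str.len Sequence
  kmer.map (fun key =>
    let L : Int := PySem.Str.len key
    if kmin ≤ L ∧ L ≤ kmax then
      (PySem.List.pyRange 0 (n - L + 1) 1).foldl
        (fun acc i => if PySem.Str.slice Sequence (some i) (some (i + L)) == key then acc + 1 else acc) 0
    else 0)

-- ===== PRECONDITION & SPEC =====
-- Pre_ excludes inputs with kmin < 0 ≤ kmax - kmin (a nonempty range containing a negative k):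
-- a negative k-mer size is outside the function's natural domain, and A's counts there are an
-- artefact of Python's negative-slice-bound wraparound.
def Pre_count_kmers (Sequence : String) (kmer : List String) (kmin : Int) (kmax : Int) : Prop :=
  0 ≤ kmin ∨ kmax < kmin
instance (Sequence : String) (kmer : List String) (kmin : Int) (kmax : Int) : Decidable (Pre_count_kmers Sequence kmer kmin kmax) := by unfold Pre_count_kmers; infer_instance

def pvWitness_count_kmers : String × List String × Int × Int := ("abcab", ["ab", "b", ""], 0, 3)

def Spec_count_kmers (Sequence : String) (kmer : List String) (kmin : Int) (kmax : Int) (out : List Int) : Prop := out = count_kmers_alt Sequence kmer kmin kmax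
instance (Sequence : String) (kmer : List String) (kmin : Int) (kmax : Int) (out : List Int) : Decidable (Spec_count_kmers Sequence kmer kmin kmax out) := by unfold Spec_count_kmers; infer_instance

-- ===== CLAIM (what is proved, stated in full; the proofs are below) =====
def Claim_equal_count_kmers : Prop := ∀ (Sequence : String) (kmer : List String) (kmin : Int) (kmax : Int), Dom_count_kmers Sequence kmer kmin kmax → Pre_count_kmers Sequence kmer kmin kmax → Spec_count_kmers Sequence kmer kmin kmax (count_kmers Sequence kmer kmin kmax)

-- ===== LEMMAS AND PROOFS =====

-- the list of k-length slices A generates for a given k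
def pvMers (Sequence : String) (k : Int) : List String :=
  (PySem.List.pyRange 0 (PySem.Str.len Sequence - k + 1) 1).map
    (fun i => PySem.Str.slice Sequence (some i) (some (i + k)))

theorem pvInner_fold (Sequence : String) (k : Int) (d : PySem.Dict String Int) (key : String) :
    ((PySem.List.pyRange 0 (PySem.Str.len Sequence - k + 1) 1).foldl (fun counter i =>
        counter.modify (PySem.Str.slice Sequence (some i) (some (i + k))) 0 (· + 1)) d).getD key 0
      = d.getD key 0 + ((pvMers Sequence k).count key : Int) := by
  have h := PySem.Dict.getD_foldl_modify_add_one
    (l := (PySem.List.pyRange 0 (PySem.Str.len Sequence - k + 1) 1).map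
      (fun i => PySem.Str.slice Sequence (some i) (some (i + k))))
    (d := d) (v := key)
  rw [List.foldl_map] at h
  rw [pvMers]
  exact h

theorem pvOuter_fold (Sequence : String) (ks : List Int) (d : PySem.Dict String Int) (key : String) :
    (ks.foldl (fun counter k =>
        (PySem.List.pyRange 0 (PySem.Str.len Sequence - k + 1) 1).foldl (fun counter i =>
          counter.modify (PySem.Str.slice Sequence (some i) (some (i + k))) 0 (· + 1)) counter) d).getD key 0
      = d.getD key 0 + (ks.map (fun k => ((pvMers Sequence k).count key : Int))).sum := by
  induction ks generalizing d with
  | nil => simp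
  | cons k ks ih =>
    simp only [List.foldl_cons, List.map_cons, List.sum_cons]
    rw [ih, pvInner_fold]
    ring

theorem pvMers_len (Sequence : String) (k : Int) (hk : 0 ≤ k) (m : String) (hm : m ∈ pvMers Sequence k) :
    (m.toList.length : Int) = k := by
  unfold pvMers at hm
  simp only [List.mem_map] at hm
  obtain ⟨i, hi, rfl⟩ := hm
  rw [PySem.List.mem_pyRange_one] at hi
  rw [PySem.Str.len_eq] at hi
  rw [PySem.Str.toList_slice, PySem.Chars.slice_eq_listSlice,
      PySem.List.slice_of_nonneg _ hi.1 (by omega) (by omega) (by omega)]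
  simp only [List.length_take, List.length_drop]
  omega

theorem pvMers_count_zero (Sequence : String) (k : Int) (hk : 0 ≤ k) (key : String)
    (h : (key.toList.length : Int) ≠ k) : (pvMers Sequence k).count key = 0 := by
  rw [List.count_eq_zero]
  intro hmem
  exact h (pvMers_len Sequence k hk key hmem)

theorem pvSum_single (key : String) (Sequence : String) (L : Int) (ks : List Int)
    (hnd : ks.Nodup) (h0 : ∀ k ∈ ks, 0 ≤ k) (hL : (key.toList.length : Int) = L) :
    (ks.map (fun k => ((pvMers Sequence k).count key : Int))).sum
      = if L ∈ ks then ((pvMers Sequence L).count key : Int) else 0 := by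
  induction ks with
  | nil => simp
  | cons k ks ih =>
    have hnd' : ks.Nodup := (List.nodup_cons.mp hnd).2
    have hknotin : k ∉ ks := (List.nodup_cons.mp hnd).1
    have h0' : ∀ k' ∈ ks, 0 ≤ k' := fun k' hk' => h0 k' (List.mem_cons_of_mem _ hk')
    simp only [List.map_cons, List.sum_cons, List.mem_cons]
    rw [ih hnd' h0']
    by_cases hkL : L = k
    · subst hkL
      simp [hknotin]
    · have : (pvMers Sequence k).count key = 0 :=
        pvMers_count_zero Sequence k (h0 k (List.mem_cons_self ..)) key (by omega)
      simp [this, hkL]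

theorem pvB_fold (Sequence : String) (key : String) (L : Int) :
    (PySem.List.pyRange 0 (PySem.Str.len Sequence - L + 1) 1).foldl
        (fun acc i => if PySem.Str.slice Sequence (some i) (some (i + L)) == key then acc + 1 else acc) 0
      = ((pvMers Sequence L).count key : Int) := by
  rw [PySem.List.foldl_count_if, pvMers, List.count_eq_countP, List.countP_map]
  simp only [Function.comp_def, zero_add]

-- ===== VERDICT (by name: the statement is the Claim_ definition above) =====
theorem count_kmers_spec : Claim_equal_count_kmers := by
  intro Sequence kmer kmin kmax _hDom hPre
  unfold Spec_count_kmers count_kmers count_kmers_alt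
  apply List.map_congr_left
  intro key _hkey
  rw [pvOuter_fold]
  rw [pvSum_single key Sequence (PySem.Str.len key) _ (PySem.List.nodup_pyRange_one _ _)
      (fun k hk => by
        rcases hPre with h | h
        · exact le_trans h ((PySem.List.mem_pyRange_one).mp hk).1
        · exact absurd hk (by simp [PySem.List.pyRange_one_eq_nil (by omega : kmax + 1 ≤ kmin)]))
      (by simp [PySem.Str.len_eq])]
  simp only [PySem.List.mem_pyRange_one, Int.lt_add_one_iff, PySem.Dict.getD_empty, pvB_fold, zero_add]
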